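-- pv_equiv track=rewrite | github.com/chuongtran145/Author-Recommendations-App | recommender.py | pick_target
-- ===== SOURCE A (Python) =====
-- from typing import Dict, Set, List, Optional
-- from collections import Counter as TCounter
--
-- Adjacency = Dict[str, TCounter]
--
-- def pick_target(adj: Adjacency, preferred: str) -> str:
--     if preferred in adj: return preferred
--     low = preferred.lower()
--     for n in adj.keys():
--         if n.lower() == low: return n
--     cand = [n for n in adj.keys() if low in n.lower()]
--     if cand: return cand[0]
--     best, best_deg = None, -1
--     for n, neigh in adj.items():
--         d = len(neigh)
--         if d > best_deg: best, best_deg = n, d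
--     return best
-- ===== SOURCE B (Python) =====
-- def pick_target(adj, preferred):
--     low = preferred.lower()
--     best_match, best_rank = None, 0
--     best_deg_node, best_deg = None, -1
--     for n, neigh in adj.items():
--         nl = n.lower()
--         rank = 3 if n == preferred else 2 if nl == low else 1 if low in nl else 0
--         if rank > best_rank:
--             best_match, best_rank = n, rank
--         d = len(neigh)
--         if d > best_deg:
--             best_deg_node, best_deg = n, d
--     return best_match if best_match is not None else best_deg_node
-- ===== Notes on version B (the rewrite author's own statement) =====
-- stated objective: alternative
-- what changed: Replaces A's four sequential scans (exact key test, case-insensitive scan, substring filter, then max-degree loop) by a single pass over the items that maintains the first node attaining the highest match rank (3 exact / 2 case-insensitive / 1 substring) together with the first max-degree node, choosing between the two after the loop.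
import Mathlib
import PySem

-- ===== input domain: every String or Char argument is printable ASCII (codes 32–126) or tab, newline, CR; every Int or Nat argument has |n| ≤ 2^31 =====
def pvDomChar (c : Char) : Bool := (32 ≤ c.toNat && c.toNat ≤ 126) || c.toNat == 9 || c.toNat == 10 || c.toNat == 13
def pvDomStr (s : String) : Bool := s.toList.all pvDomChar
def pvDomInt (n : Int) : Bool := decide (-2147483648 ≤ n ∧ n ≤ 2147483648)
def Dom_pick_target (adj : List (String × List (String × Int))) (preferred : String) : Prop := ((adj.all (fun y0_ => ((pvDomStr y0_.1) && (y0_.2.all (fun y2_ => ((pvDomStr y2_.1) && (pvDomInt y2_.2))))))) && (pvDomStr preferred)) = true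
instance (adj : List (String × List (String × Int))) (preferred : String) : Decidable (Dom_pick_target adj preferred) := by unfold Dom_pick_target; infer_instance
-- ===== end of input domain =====

-- B replaces A's four sequential scans (exact / case-insensitive / substring match, then max-degree
-- fallback) by a single pass maintaining the first best-ranked match and the first max-degree node
-- (objective: alternative decomposition, one traversal instead of up to four).

-- ===== PORT A =====
-- shared degree step: 'd = len(neigh); if d > best_deg: best, best_deg = n, d'
-- (this loop body is textually identical in A and in B)
def pvDStep (st : Option String × Int) (p : String × List (String × Int)) : Option String × Int :=
  if (p.2.length : Int) > st.2 then (some p.1, (p.2.length : Int)) else st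

def pick_target (adj : List (String × List (String × Int))) (preferred : String) : Option String :=
  if (adj.map Prod.fst).contains preferred then some preferred
  else
    let low := PySem.Str.lower preferred
    match (adj.map Prod.fst).find? (fun n => PySem.Str.lower n == low) with
    | some n => some n
    | none =>
      match (adj.map Prod.fst).filter (fun n => PySem.Str.isIn low (PySem.Str.lower n)) with
      | c :: _ => some c
      | [] => (adj.foldl pvDStep (none, -1)).1

-- ===== PORT B =====
-- rank of a node name: 3 exact, 2 case-insensitive, 1 substring, 0 none
def pvRank (preferred low n : String) : Int :=
  if n == preferred then 3
  else if PySem.Str.lower n == low then 2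
  else if PySem.Str.isIn low (PySem.Str.lower n) then 1
  else 0

-- match step: 'if rank > best_rank: best_match, best_rank = n, rank'
def pvMStep (preferred low : String) (st : Option String × Int) (p : String × List (String × Int)) : Option String × Int :=
  if pvRank preferred low p.1 > st.2 then (some p.1, pvRank preferred low p.1) else st

def pick_target_alt (adj : List (String × List (String × Int))) (preferred : String) : Option String :=
  let low := PySem.Str.lower preferred
  let st := adj.foldl (fun st p => (pvMStep preferred low st.1 p, pvDStep st.2 p)) ((none, 0), (none, -1))
  match st.1.1 with
  | some n => some n
  | none => st.2.1

-- ===== PRECONDITION & SPEC =====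
def Spec_pick_target (adj : List (String × List (String × Int))) (preferred : String) (out : Option String) : Prop := out = pick_target_alt adj preferred
instance (adj : List (String × List (String × Int))) (preferred : String) (out : Option String) : Decidable (Spec_pick_target adj preferred out) := by unfold Spec_pick_target; infer_instance

-- ===== CLAIM (what is proved, stated in full; the proofs are below) =====
def Claim_equal_pick_target : Prop := ∀ (adj : List (String × List (String × Int))) (preferred : String), Dom_pick_target adj preferred → Spec_pick_target adj preferred (pick_target adj preferred)

-- ===== LEMMAS AND PROOFS =====

-- running maximum of ranks
def pvMaxRank (preferred low : String) (keys : List String) (br : Int) : Int :=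
  keys.foldl (fun m n => max m (pvRank preferred low n)) br

theorem pvMaxRank_ge (preferred low : String) (keys : List String) (br : Int) :
    br ≤ pvMaxRank preferred low keys br := by
  induction keys generalizing br with
  | nil => simp [pvMaxRank]
  | cons h t ih =>
      simp only [pvMaxRank, List.foldl_cons] at *
      exact le_trans (le_max_left _ _) (ih _)

theorem pvMaxRank_le (preferred low : String) (keys : List String) (br c : Int)
    (h0 : br ≤ c) (h : ∀ n ∈ keys, pvRank preferred low n ≤ c) :
    pvMaxRank preferred low keys br ≤ c := by
  induction keys generalizing br with
  | nil => simpa [pvMaxRank]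
  | cons hd t ih =>
      simp only [pvMaxRank, List.foldl_cons] at *
      exact ih _ (max_le h0 (h hd (by simp))) (fun n hn => h n (by simp [hn]))

theorem pvMaxRank_mem (preferred low : String) (keys : List String) (br : Int)
    {n : String} (hn : n ∈ keys) : pvRank preferred low n ≤ pvMaxRank preferred low keys br := by
  induction keys generalizing br with
  | nil => cases hn
  | cons hd t ih =>
      simp only [pvMaxRank, List.foldl_cons]
      rcases List.mem_cons.mp hn with rfl | hmem
      · exact le_trans (le_max_right _ _) (pvMaxRank_ge _ _ _ _)
      · exact ih _ hmem

theorem pv_find?_congr {α : Type} (l : List α) (p q : α → Bool)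
    (h : ∀ a ∈ l, p a = q a) : l.find? p = l.find? q := by
  induction l with
  | nil => rfl
  | cons hd t ih =>
      simp only [List.find?_cons]
      rw [h hd (by simp)]
      cases q hd
      · exact ih (fun a ha => h a (by simp [ha]))
      · rfl

theorem pv_find?_beq_self (l : List String) (a : String) (h : a ∈ l) :
    l.find? (fun n => n == a) = some a := by
  induction l with
  | nil => cases h
  | cons hd t ih =>
      simp only [List.find?_cons]
      by_cases hh : (hd == a) = true
      · rw [hh]
        exact congrArg some (eq_of_beq hh)
      · have hh' : (hd == a) = false := by rwa [Bool.not_eq_true] at hh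
        rw [hh']
        rcases List.mem_cons.mp h with rfl | hmem
        · rw [beq_self_eq_true] at hh'
          exact Bool.noConfusion hh'
        · exact ih hmem

theorem pv_find?_eq_head_filter {α : Type} (l : List α) (p : α → Bool) :
    l.find? p = (l.filter p).head? := by
  induction l with
  | nil => rfl
  | cons hd t ih =>
      simp only [List.find?_cons, List.filter_cons]
      cases hp : p hd
      · exact ih
      · rfl

-- the paired fold splits into two independent folds
theorem pv_fold_pair (preferred low : String) (adj : List (String × List (String × Int)))
    (s1 s2 : Option String × Int) :
    adj.foldl (fun st p => (pvMStep preferred low st.1 p, pvDStep st.2 p)) (s1, s2)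
      = (adj.foldl (pvMStep preferred low) s1, adj.foldl pvDStep s2) := by
  induction adj generalizing s1 s2 with
  | nil => rfl
  | cons hd t ih => simp only [List.foldl_cons]; exact ih _ _

-- the match fold returns the first key attaining the overall maximal rank (or b when no rank exceeds br)
theorem pv_mfold_char (preferred low : String) (keys : List String) (b : Option String) (br : Int) :
    keys.foldl (fun st n => if pvRank preferred low n > st.2 then (some n, pvRank preferred low n) else st) (b, br)
      = ((if pvMaxRank preferred low keys br = br then b
          else keys.find? (fun n => pvRank preferred low n == pvMaxRank preferred low keys br)),
         pvMaxRank preferred low keys br) := by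
  induction keys generalizing b br with
  | nil => simp [pvMaxRank]
  | cons hd t ih =>
      simp only [List.foldl_cons]
      have hM : pvMaxRank preferred low (hd :: t) br
          = pvMaxRank preferred low t (max br (pvRank preferred low hd)) := by
        simp [pvMaxRank]
      by_cases hgt : pvRank preferred low hd > br
      · rw [if_pos hgt, ih]
        have hmax : max br (pvRank preferred low hd) = pvRank preferred low hd := by omega
        rw [hM, hmax]
        have hge : pvRank preferred low hd ≤ pvMaxRank preferred low t (pvRank preferred low hd) :=
          pvMaxRank_ge _ _ _ _
        have hne : pvMaxRank preferred low t (pvRank preferred low hd) ≠ br := by omega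
        rw [if_neg hne]
        simp only [List.find?_cons]
        by_cases heq : pvMaxRank preferred low t (pvRank preferred low hd) = pvRank preferred low hd
        · rw [if_pos heq]
          have : (pvRank preferred low hd == pvMaxRank preferred low t (pvRank preferred low hd)) = true := by
            simp [heq]
          rw [this]
        · rw [if_neg heq]
          have : (pvRank preferred low hd == pvMaxRank preferred low t (pvRank preferred low hd)) = false := by
            simp; omega
          rw [this]
      · rw [if_neg hgt, ih]
        have hmax : max br (pvRank preferred low hd) = br := by omega
        rw [hM, hmax]
        by_cases heq : pvMaxRank preferred low t br = br
        · rw [if_pos heq, if_pos heq]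
        · rw [if_neg heq, if_neg heq]
          have hgeb : br ≤ pvMaxRank preferred low t br := pvMaxRank_ge _ _ _ _
          simp only [List.find?_cons]
          have : (pvRank preferred low hd == pvMaxRank preferred low t br) = false := by
            simp; omega
          rw [this]

theorem pvRank_le_three (preferred low n : String) : pvRank preferred low n ≤ 3 := by
  unfold pvRank; split_ifs <;> omega

-- ===== VERDICT (by name: the statement is the Claim_ definition above) =====
theorem pick_target_spec : Claim_equal_pick_target := by
  intro adj preferred _
  unfold Spec_pick_target
  simp only [pick_target, pick_target_alt]
  rw [pv_fold_pair]
  have hmfold : adj.foldl (pvMStep preferred (PySem.Str.lower preferred)) (none, 0)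
      = (adj.map Prod.fst).foldl (fun st n => if pvRank preferred (PySem.Str.lower preferred) n > st.2 then (some n, pvRank preferred (PySem.Str.lower preferred) n) else st) (none, 0) := by
    rw [List.foldl_map]; rfl
  rw [hmfold, pv_mfold_char]
  set low := PySem.Str.lower preferred with hlow
  set keys := adj.map Prod.fst with hkeys
  set M := pvMaxRank preferred low keys 0 with hM
  have hM0 : 0 ≤ M := pvMaxRank_ge _ _ _ _
  by_cases hc : keys.contains preferred
  · -- phase 1: exact match
    have hmem : preferred ∈ keys := by simpa using hc
    have hrk : pvRank preferred low preferred = 3 := by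
      unfold pvRank
      rw [beq_self_eq_true]
      rfl
    have h3le : (3 : Int) ≤ M := by
      have := pvMaxRank_mem preferred low keys 0 hmem; omega
    have hle3 : M ≤ 3 := pvMaxRank_le _ _ _ _ _ (by omega) (fun n _ => pvRank_le_three _ _ _)
    have hMeq : M = 3 := le_antisymm hle3 h3le
    rw [if_pos hc, hMeq]
    have hpred : ∀ n ∈ keys, (pvRank preferred low n == (3 : Int)) = (n == preferred) := by
      intro n _
      unfold pvRank
      cases hA : (n == preferred) <;>
        cases hB : (PySem.Str.lower n == low) <;>
          cases hC : PySem.Str.isIn low (PySem.Str.lower n) <;> decide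
    rw [pv_find?_congr _ _ _ hpred, pv_find?_beq_self _ _ hmem]
    norm_num
  · -- preferred not a key: no rank-3 node
    have hnot : ∀ n ∈ keys, (n == preferred) = false := by
      intro n hn
      by_contra hb
      rw [Bool.not_eq_false] at hb
      exact hc (by simp [eq_of_beq hb ▸ hn])
    have hle2 : ∀ n ∈ keys, pvRank preferred low n ≤ 2 := by
      intro n hn
      unfold pvRank
      rw [hnot n hn]
      simp only [Bool.false_eq_true, if_false]
      split_ifs <;> omega
    rw [if_neg hc]
    cases hfind : keys.find? (fun n => PySem.Str.lower n == low) with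
    | some n =>
        -- phase 2: case-insensitive match
        have hnmem : n ∈ keys := List.mem_of_find?_eq_some hfind
        have hnp : (PySem.Str.lower n == low) = true := by
          have := List.find?_some hfind
          exact this
        have hrk2 : pvRank preferred low n = 2 := by
          unfold pvRank
          rw [hnot n hnmem, hnp]
          simp
        have h2le : (2 : Int) ≤ M := by
          have := pvMaxRank_mem preferred low keys 0 hnmem; omega
        have hMle2 : M ≤ 2 := pvMaxRank_le _ _ _ _ _ (by omega) hle2
        have hMeq : M = 2 := le_antisymm hMle2 h2le
        rw [hMeq]
        have hpred : ∀ m ∈ keys, (pvRank preferred low m == (2 : Int)) = (PySem.Str.lower m == low) := by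
          intro m hm
          unfold pvRank
          rw [hnot m hm]
          cases hB : (PySem.Str.lower m == low) <;>
            cases hC : PySem.Str.isIn low (PySem.Str.lower m) <;> decide
        rw [if_neg (by omega), pv_find?_congr _ _ _ hpred, hfind]
    | none =>
        have hnolow : ∀ n ∈ keys, (PySem.Str.lower n == low) = false := by
          intro n hn
          have := List.find?_eq_none.mp hfind n hn
          simpa using this
        have hle1 : ∀ n ∈ keys, pvRank preferred low n ≤ 1 := by
          intro n hn
          unfold pvRank
          rw [hnot n hn, hnolow n hn]
          simp only [Bool.false_eq_true, if_false]
          split_ifs <;> omega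
        cases hfil : keys.filter (fun n => PySem.Str.isIn low (PySem.Str.lower n)) with
        | cons c rest =>
            -- phase 3: substring match
            have hcmem : c ∈ keys := List.mem_of_mem_filter (p := fun n => PySem.Str.isIn low (PySem.Str.lower n)) (by rw [hfil]; simp)
            have hcp : PySem.Str.isIn low (PySem.Str.lower c) = true :=
              List.of_mem_filter (p := fun n => PySem.Str.isIn low (PySem.Str.lower n)) (by rw [hfil]; simp)
            have hrk1 : pvRank preferred low c = 1 := by
              unfold pvRank
              rw [hnot c hcmem, hnolow c hcmem, hcp]
              simp
            have h1le : (1 : Int) ≤ M := by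
              have := pvMaxRank_mem preferred low keys 0 hcmem; omega
            have hMle1 : M ≤ 1 := pvMaxRank_le _ _ _ _ _ (by omega) hle1
            have hMeq : M = 1 := le_antisymm hMle1 h1le
            rw [hMeq]
            have hpred : ∀ m ∈ keys, (pvRank preferred low m == (1 : Int)) = (PySem.Str.isIn low (PySem.Str.lower m)) := by
              intro m hm
              unfold pvRank
              rw [hnot m hm, hnolow m hm]
              cases hC : PySem.Str.isIn low (PySem.Str.lower m) <;> decide
            rw [if_neg (by omega), pv_find?_congr _ _ _ hpred, pv_find?_eq_head_filter, hfil]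
            rfl
        | nil =>
            -- phase 4: degree fallback
            have hrk0 : ∀ n ∈ keys, pvRank preferred low n ≤ 0 := by
              intro n hn
              have hno1 : PySem.Str.isIn low (PySem.Str.lower n) = false := by
                by_contra hx
                rw [Bool.not_eq_false] at hx
                have hmemf : n ∈ keys.filter (fun n => PySem.Str.isIn low (PySem.Str.lower n)) :=
                  List.mem_filter.mpr ⟨hn, hx⟩
                rw [hfil] at hmemf; cases hmemf
              unfold pvRank
              rw [hnot n hn, hnolow n hn, hno1]
              simp
            have hMeq : M = 0 :=
              le_antisymm (pvMaxRank_le _ _ _ _ _ (by omega) hrk0) hM0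
            rw [hMeq, if_pos rfl]
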